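-- pv_equiv track=rewrite | github.com/ricklupton/floweaver | floweaver/ordering.py | flatten_bands
-- ===== SOURCE A (Python) =====
-- def flatten_bands(bands):
--     L = []
--     idx = []
--     i = 0
--     for band in bands:
--         L.extend(band)
--         idx.append(i)
--         i += len(band)
--     return L, idx
-- ===== SOURCE B (Python) =====
-- def flatten_bands(bands):
--     lengths = [len(b) for b in bands]
--     idx = [sum(lengths[:k]) for k in range(len(bands))]
--     L = [x for b in bands for x in b]
--     return L, idx
-- ===== Notes on version B (the rewrite author's own statement) =====
-- stated objective: alternative
-- what changed: Replaces A's single interleaved loop with running offset by three independent passes: a lengths table, prefix sums of that table for the start indices, and a flat comprehension for the elements.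
import Mathlib
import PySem

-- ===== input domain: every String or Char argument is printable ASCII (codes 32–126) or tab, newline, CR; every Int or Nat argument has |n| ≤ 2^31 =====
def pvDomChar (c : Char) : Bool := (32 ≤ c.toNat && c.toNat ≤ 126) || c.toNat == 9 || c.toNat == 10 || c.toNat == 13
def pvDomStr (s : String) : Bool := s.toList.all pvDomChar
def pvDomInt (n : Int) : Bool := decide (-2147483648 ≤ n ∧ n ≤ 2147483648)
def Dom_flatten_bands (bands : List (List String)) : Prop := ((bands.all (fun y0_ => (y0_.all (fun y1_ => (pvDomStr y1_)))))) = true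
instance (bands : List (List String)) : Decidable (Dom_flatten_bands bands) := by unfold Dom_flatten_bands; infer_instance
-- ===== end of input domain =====

-- ===== PORT A =====
-- B recomputes the flattening and the start indices in separate passes (lengths table + prefix sums + flat comprehension) instead of A's one loop with a running offset; same values.
def flatten_bands (bands : List (List String)) : List String × List Int :=
  let s := bands.foldl
    (fun (st : List String × List Int × Int) band =>
      (st.1 ++ band, st.2.1 ++ [st.2.2], st.2.2 + (band.length : Int)))
    ([], [], 0)
  (s.1, s.2.1)

-- ===== PORT B =====
def flatten_bands_alt (bands : List (List String)) : List String × List Int :=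
  let lengths : List Int := bands.map (fun b => (b.length : Int))
  let idx : List Int := (List.range bands.length).map (fun k => (lengths.take k).sum)
  let L : List String := bands.flatMap (fun b => b)
  (L, idx)

-- ===== PRECONDITION & SPEC =====
def Spec_flatten_bands (bands : List (List String)) (out : List String × List Int) : Prop := out = flatten_bands_alt bands
instance (bands : List (List String)) (out : List String × List Int) : Decidable (Spec_flatten_bands bands out) := by unfold Spec_flatten_bands; infer_instance

-- ===== CLAIM (what is proved, stated in full; the proofs are below) =====
def Claim_equal_flatten_bands : Prop := ∀ (bands : List (List String)), Dom_flatten_bands bands → Spec_flatten_bands bands (flatten_bands bands)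

-- ===== LEMMAS AND PROOFS =====

-- ===== VERDICT (by name: the statement is the Claim_ definition above) =====
lemma flatten_bands_loop (bands : List (List String)) (L0 : List String) (idx0 : List Int) (i0 : Int) :
    bands.foldl
      (fun (st : List String × List Int × Int) band =>
        (st.1 ++ band, st.2.1 ++ [st.2.2], st.2.2 + (band.length : Int)))
      (L0, idx0, i0)
    = (L0 ++ bands.flatMap (fun b => b),
       idx0 ++ (List.range bands.length).map
         (fun k => i0 + ((bands.map (fun b => (b.length : Int))).take k).sum),
       i0 + (bands.map (fun b => (b.length : Int))).sum) := by
  induction bands generalizing L0 idx0 i0 with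
  | nil => simp
  | cons b bs ih =>
    simp only [List.foldl_cons, ih, List.flatMap_cons, List.map_cons, List.sum_cons,
      List.length_cons, List.range_succ_eq_map, List.map_map]
    refine Prod.ext (by simp) (Prod.ext ?_ (by dsimp only; omega))
    simp only [Function.comp_def, List.take_succ_cons, List.sum_cons,
      List.take_zero, List.sum_nil, add_zero, List.append_assoc, List.cons_append,
      List.nil_append]
    congr 2
    exact List.map_congr_left (fun k _ => by ring)

theorem flatten_bands_spec : Claim_equal_flatten_bands := by
  intro bands _
  unfold Spec_flatten_bands flatten_bands flatten_bands_alt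
  simp only [flatten_bands_loop, List.nil_append]
  congr 1
  apply List.map_congr_left
  intro k _
  simp
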